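-- pv_equiv track=rewrite | github.com/ElchaabiMohamed/InferCode_SVM | NC-5690-python-files/program_1457.py | indiceOccurence
-- ===== SOURCE A (Python) =====
-- def indiceOccurence(n,x,l):
--   trouve=0
--   i=0
--   while i<len(l) and trouve!=n:
--     if x==l[i]:
--       trouve=trouve+1
--     i=i+1
--   return i
-- ===== SOURCE B (Python) =====
-- def indiceOccurence(n, x, l):
--     if n == 0:
--         return 0
--     positions = [i for i, v in enumerate(l) if v == x]
--     if 1 <= n <= len(positions):
--         return positions[n - 1] + 1
--     return len(l)
-- ===== Notes on version B (the rewrite author's own statement) =====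
-- stated objective: alternative
-- what changed: B replaces the early-stopping counting while-loop by a collect-then-index decomposition: it builds the list of all positions of x in one pass and answers by indexing into that table (0 for n==0, positions[n-1]+1 when the nth occurrence exists, else len(l)).
import Mathlib
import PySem

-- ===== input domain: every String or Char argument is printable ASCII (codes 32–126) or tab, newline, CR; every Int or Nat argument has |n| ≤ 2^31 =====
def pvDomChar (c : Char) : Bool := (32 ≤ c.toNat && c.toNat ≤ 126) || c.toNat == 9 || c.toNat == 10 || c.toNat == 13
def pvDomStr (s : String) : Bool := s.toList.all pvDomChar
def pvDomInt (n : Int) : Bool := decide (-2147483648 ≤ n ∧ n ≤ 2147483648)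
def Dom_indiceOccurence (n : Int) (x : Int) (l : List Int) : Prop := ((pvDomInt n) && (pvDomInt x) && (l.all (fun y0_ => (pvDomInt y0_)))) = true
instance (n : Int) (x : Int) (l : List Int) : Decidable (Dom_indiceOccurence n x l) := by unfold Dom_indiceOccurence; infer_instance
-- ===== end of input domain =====

-- B replaces A's early-stopping counting while-loop by a collect-then-index decomposition
-- (table of all positions of x, then indexing); same cost, alternative structure.


-- ===== PORT A =====
-- the while loop: walks the list with index i and counter trouve, stops when trouve = n
def loopA (n x : Int) : List Int → Int → Int → Int
  | [], i, _ => i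
  | a :: rest, i, trouve =>
    if trouve ≠ n then
      if x = a then loopA n x rest (i + 1) (trouve + 1)
      else loopA n x rest (i + 1) trouve
    else i

def indiceOccurence (n : Int) (x : Int) (l : List Int) : Int := loopA n x l 0 0

-- ===== PORT B =====
-- the comprehension [i for i,v in enumerate(l) if v == x]
def posList (x : Int) : List Int → Int → List Int
  | [], _ => []
  | a :: rest, i => if a = x then i :: posList x rest (i + 1) else posList x rest (i + 1)

def indiceOccurence_alt (n : Int) (x : Int) (l : List Int) : Int :=
  if n = 0 then 0
  else
    let positions := posList x l 0
    if 1 ≤ n ∧ n ≤ (positions.length : Int) then positions.getD (n - 1).toNat 0 + 1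
    else (l.length : Int)

-- ===== PRECONDITION & SPEC =====
def Spec_indiceOccurence (n : Int) (x : Int) (l : List Int) (out : Int) : Prop := out = indiceOccurence_alt n x l
instance (n : Int) (x : Int) (l : List Int) (out : Int) : Decidable (Spec_indiceOccurence n x l out) := by unfold Spec_indiceOccurence; infer_instance

-- ===== CLAIM (what is proved, stated in full; the proofs are below) =====
def Claim_equal_indiceOccurence : Prop := ∀ (n : Int) (x : Int) (l : List Int), Dom_indiceOccurence n x l → Spec_indiceOccurence n x l (indiceOccurence n x l)

-- ===== LEMMAS AND PROOFS =====

-- index (0-based) of the m-th (1-based) occurrence of x in l, none if m < 1 or not enough occurrences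
def nthPos (x : Int) : List Int → Int → Option Int
  | [], _ => none
  | a :: rest, m =>
    if a = x then
      if m = 1 then some 0 else (nthPos x rest (m - 1)).map (· + 1)
    else (nthPos x rest m).map (· + 1)

theorem nthPos_none_of_nonpos (x : Int) (l : List Int) (m : Int) (hm : m < 1) :
    nthPos x l m = none := by
  induction l generalizing m with
  | nil => rfl
  | cons a rest ih =>
    simp only [nthPos]
    split_ifs with h1 h2
    · omega
    · rw [ih (m - 1) (by omega)]; rfl
    · rw [ih m hm]; rfl

theorem loopA_spec (n x : Int) (l : List Int) (i trouve : Int) :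
    loopA n x l i trouve =
      if trouve = n then i
      else match nthPos x l (n - trouve) with
        | some j => i + j + 1
        | none => i + l.length := by
  induction l generalizing i trouve with
  | nil =>
    simp only [loopA, nthPos]
    split_ifs <;> simp
  | cons a rest ih =>
    simp only [loopA, nthPos]
    by_cases ht : trouve = n
    · simp [ht]
    · simp only [ht, ne_eq, not_false_eq_true, if_true]
      by_cases hx : x = a
      · rw [ih]
        by_cases h1 : trouve + 1 = n
        · have : n - trouve = 1 := by omega
          simp [hx, h1, this]
        · have h2 : n - trouve ≠ 1 := by omega
          have h3 : n - (trouve + 1) = n - trouve - 1 := by omega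
          rw [if_pos hx.symm, if_neg h2, if_neg h1, h3]
          cases hnp : nthPos x rest (n - trouve - 1) with
          | none => simp [hx]; ring
          | some j => simp [hx]; ring
      · have hax : ¬ a = x := fun h => hx h.symm
        rw [if_neg hx, ih, if_neg ht, if_neg hax]
        cases hnp : nthPos x rest (n - trouve) with
        | none => simp; ring
        | some j => simp; ring

theorem posList_get? (x : Int) (l : List Int) (i m : Int) (hm : 1 ≤ m) :
    (posList x l i)[(m - 1).toNat]? = (nthPos x l m).map (· + i) := by
  induction l generalizing i m with
  | nil => simp [posList, nthPos]
  | cons a rest ih =>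
    simp only [posList, nthPos]
    by_cases ha : a = x
    · rw [if_pos ha, if_pos ha]
      by_cases h1 : m = 1
      · simp [h1]
      · have h2 : 2 ≤ m := by omega
        have hi : (m - 1).toNat = ((m - 1) - 1).toNat + 1 := by omega
        rw [if_neg h1, hi]
        simp only [List.getElem?_cons_succ]
        rw [ih (i + 1) (m - 1) (by omega)]
        cases nthPos x rest (m - 1) with
        | none => rfl
        | some j => simp; ring
    · rw [if_neg ha, if_neg ha, ih (i + 1) m hm]
      cases nthPos x rest m with
      | none => rfl
      | some j => simp; ring

theorem posList_length_iff (x : Int) (l : List Int) (i m : Int) (hm : 1 ≤ m) :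
    (m ≤ ((posList x l i).length : Int)) ↔ (nthPos x l m).isSome := by
  have h := posList_get? x l i m hm
  constructor
  · intro hle
    have hlt : (m - 1).toNat < (posList x l i).length := by omega
    have hsome := List.getElem?_eq_getElem hlt
    rw [h] at hsome
    cases hnp : nthPos x l m with
    | none => rw [hnp] at hsome; simp at hsome
    | some j => simp
  · intro hs
    cases hnp : nthPos x l m with
    | none => rw [hnp] at hs; simp at hs
    | some j =>
      rw [hnp] at h
      have : (m - 1).toNat < (posList x l i).length := by
        by_contra hc
        rw [List.getElem?_eq_none (by omega)] at h
        simp at h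
      omega

-- ===== VERDICT (by name: the statement is the Claim_ definition above) =====
theorem indiceOccurence_spec : Claim_equal_indiceOccurence := by
  intro n x l _
  unfold Spec_indiceOccurence indiceOccurence indiceOccurence_alt
  rw [loopA_spec]
  simp only [sub_zero, zero_add]
  by_cases hn : n = 0
  · simp [hn]
  · have h0 : ¬ (0 : Int) = n := fun h => hn h.symm
    rw [if_neg h0, if_neg hn]
    by_cases hrng : 1 ≤ n ∧ n ≤ ((posList x l 0).length : Int)
    · rw [if_pos hrng]
      have hs := (posList_length_iff x l 0 n hrng.1).1 hrng.2
      cases hnp : nthPos x l n with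
      | none => rw [hnp] at hs; simp at hs
      | some j =>
        have hg := posList_get? x l 0 n hrng.1
        rw [hnp] at hg
        simp only [Option.map_some, add_zero] at hg
        have hd : (posList x l 0).getD (n - 1).toNat 0 = j := by
          rw [List.getD_eq_getElem?_getD, hg]; rfl
        show j + 1 = (posList x l 0).getD (n - 1).toNat 0 + 1
        rw [hd]
    · rw [if_neg hrng]
      by_cases h1 : 1 ≤ n
      · have hgt : ¬ n ≤ ((posList x l 0).length : Int) := fun h => hrng ⟨h1, h⟩
        have : nthPos x l n = none := by
          cases hnp : nthPos x l n with
          | none => rfl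
          | some j =>
            exact absurd ((posList_length_iff x l 0 n h1).2 (by simp [hnp])) hgt
        rw [this]
      · rw [nthPos_none_of_nonpos x l n (by omega)]
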